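-- pv_equiv track=rewrite | github.com/ndaheim/noisy_channel_model | code/i6_noisy_channel/score.py | selection_range
-- ===== SOURCE A (Python) =====
-- def selection_range(upper):
--     i = 1
--     j = 0
--     while i <= upper:
--         yield i
--         if j == 0:
--             i *= 5
--         else:
--             i *= 2
--         j = (j + 1) % 2
-- ===== SOURCE B (Python) =====
-- def selection_range(upper):
--     p = 1
--     while p <= upper:
--         yield p
--         if 5 * p <= upper:
--             yield 5 * p
--         p *= 10
-- ===== Notes on version B (the rewrite author's own statement) =====
-- stated objective: simpler
-- what changed: Replaced the alternating x5/x2 state toggle with a single decade variable p (powers of 10) that yields p and, when it fits, 5*p, multiplying p by 10 per iteration.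
import Mathlib
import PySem

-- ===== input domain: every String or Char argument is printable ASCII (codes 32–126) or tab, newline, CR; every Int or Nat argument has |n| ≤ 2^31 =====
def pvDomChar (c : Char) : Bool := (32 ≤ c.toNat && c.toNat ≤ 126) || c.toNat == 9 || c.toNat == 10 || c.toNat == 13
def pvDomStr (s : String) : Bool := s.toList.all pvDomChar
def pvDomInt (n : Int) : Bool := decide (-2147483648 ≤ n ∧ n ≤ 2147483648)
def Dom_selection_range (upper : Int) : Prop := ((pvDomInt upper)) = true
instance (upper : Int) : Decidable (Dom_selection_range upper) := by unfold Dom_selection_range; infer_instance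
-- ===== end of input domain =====

-- ===== PORT A =====
-- One honest line: B replaces A's alternating *5/*2 toggle with one decade variable
-- p (powers of ten) emitting p and 5*p together; objective: simpler, same cost.
-- Loop of A; positivity of i (1 <= i) is carried as a hypothesis for termination only.
def selection_rangeGoA (upper i j : Int) (hi : 1 ≤ i) : List Int :=
  if _h : i ≤ upper then
    i :: selection_rangeGoA upper (if j = 0 then i * 5 else i * 2) (PySem.Int.mod (j + 1) 2)
          (by split <;> omega)
  else []
termination_by (upper + 1 - i).toNat
decreasing_by by_cases hj : j = 0 <;> simp only [hj] <;> simp <;> omega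

def selection_range (upper : Int) : List Int :=
  selection_rangeGoA upper 1 0 (by omega)

-- ===== PORT B =====
def selection_rangeGoB (upper p : Int) (hp : 1 ≤ p) : List Int :=
  if _h : p ≤ upper then
    (p :: (if 5 * p ≤ upper then [5 * p] else []))
      ++ selection_rangeGoB upper (p * 10) (by omega)
  else []
termination_by (upper + 1 - p).toNat
decreasing_by omega

def selection_range_alt (upper : Int) : List Int :=
  selection_rangeGoB upper 1 (by omega)

-- ===== PRECONDITION & SPEC =====
def Spec_selection_range (upper : Int) (out : List Int) : Prop := out = selection_range_alt upper
instance (upper : Int) (out : List Int) : Decidable (Spec_selection_range upper out) := by unfold Spec_selection_range; infer_instance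

-- ===== CLAIM (what is proved, stated in full; the proofs are below) =====
def Claim_equal_selection_range : Prop := ∀ (upper : Int), Dom_selection_range upper → Spec_selection_range upper (selection_range upper)

-- ===== LEMMAS AND PROOFS =====
theorem goA_eq_goB (n : Nat) (upper i : Int) (hi : 1 ≤ i) (hn : (upper + 1 - i).toNat ≤ n) :
    selection_rangeGoA upper i 0 hi = selection_rangeGoB upper i hi := by
  induction n generalizing i with
  | zero =>
    rw [selection_rangeGoA.eq_def, selection_rangeGoB.eq_def]
    split
    · omega
    · rfl
  | succ n ih =>
    rw [selection_rangeGoA.eq_def, selection_rangeGoB.eq_def]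
    split
    · rename_i h1
      rw [selection_rangeGoA.eq_def]
      have hm : PySem.Int.mod (0 + 1) 2 = 1 := by decide
      have hm2 : PySem.Int.mod (1 + 1) 2 = 0 := by decide
      simp only [hm, if_neg (one_ne_zero), hm2, if_true]
      by_cases h2 : i * 5 ≤ upper
      · rw [dif_pos h2, if_pos (by omega : 5 * i ≤ upper)]
        have := ih (i * 5 * 2) (by omega) (by omega)
        simp only [List.cons_append]
        refine List.cons_eq_cons.mpr ⟨rfl, List.cons_eq_cons.mpr ⟨by omega, ?_⟩⟩
        rw [this]
        congr 1
        ring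
      · rw [dif_neg h2, if_neg (by omega : ¬ 5 * i ≤ upper)]
        simp only [List.cons_append, List.nil_append]
        refine List.cons_eq_cons.mpr ⟨rfl, ?_⟩
        rw [selection_rangeGoB.eq_def]
        rw [dif_neg (by omega : ¬ i * 10 ≤ upper)]
    · rfl

-- ===== VERDICT (by name: the statement is the Claim_ definition above) =====
theorem selection_range_spec : Claim_equal_selection_range := by
  intro upper _
  unfold Spec_selection_range selection_range selection_range_alt
  exact goA_eq_goB (upper + 1 - 1).toNat upper 1 (by omega) (by omega)
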